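-- pv_equiv track=rewrite | github.com/zrei/aoc23 | Day 4/day4.py | numWinningCards
-- ===== SOURCE A (Python) =====
-- def numWinningCards(cardNums: list[str], winningCardNums: list[str]) -> int:
--     final: int = 0
--     for num in cardNums:
--         if num and num in winningCardNums:
--             if final == 0:
--                 final = 1
--             else:
--                 final *= 2
--     return final
-- ===== SOURCE B (Python) =====
-- def numWinningCards(cardNums: list[str], winningCardNums: list[str]) -> int:
--     winning = set(winningCardNums)
--     counts = {}
--     for num in cardNums:
--         counts[num] = counts.get(num, 0) + 1
--     count = 0
--     for num, k in counts.items():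
--         if num and num in winning:
--             count += k
--     return 2 ** count // 2
-- ===== Notes on version B (the rewrite author's own statement) =====
-- stated objective: faster
-- what changed: Builds a hash set of winners and a multiplicity dict of cardNums, sums multiplicities of matching distinct keys, and returns the closed form 2**count // 2 instead of A's per-element inner list scan with a set-to-1-then-double accumulator.
import Mathlib
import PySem

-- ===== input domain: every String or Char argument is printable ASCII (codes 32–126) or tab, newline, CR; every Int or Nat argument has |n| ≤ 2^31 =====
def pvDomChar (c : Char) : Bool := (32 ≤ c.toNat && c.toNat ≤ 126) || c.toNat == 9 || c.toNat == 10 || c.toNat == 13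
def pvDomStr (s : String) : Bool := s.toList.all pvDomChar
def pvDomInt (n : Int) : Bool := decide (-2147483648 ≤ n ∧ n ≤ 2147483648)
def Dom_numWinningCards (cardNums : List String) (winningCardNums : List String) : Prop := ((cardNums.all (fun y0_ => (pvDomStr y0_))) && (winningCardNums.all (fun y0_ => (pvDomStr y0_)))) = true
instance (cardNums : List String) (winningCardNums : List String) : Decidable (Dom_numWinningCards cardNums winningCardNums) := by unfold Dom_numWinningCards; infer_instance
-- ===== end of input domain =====

-- B builds a set of winners and a multiplicity dict of cardNums, sums multiplicities of the
-- matching distinct keys and returns the closed form 2^count // 2 (objective: faster — a set/dict replace the inner list scan).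

-- ===== PORT A =====
def numWinningCards (cardNums : List String) (winningCardNums : List String) : Int :=
  cardNums.foldl
    (fun final num =>
      if num ≠ "" ∧ winningCardNums.contains num then
        if final = 0 then 1 else final * 2
      else final)
    0

-- ===== PORT B =====
def numWinningCards_alt (cardNums : List String) (winningCardNums : List String) : Int :=
  let winning : PySem.Set String := PySem.Set.ofList winningCardNums
  let counts : PySem.Dict String Int :=
    cardNums.foldl (fun d num => d.insert num (d.getD num 0 + 1)) PySem.Dict.empty
  let count : Int :=
    counts.items.foldl
      (fun acc p => if p.1 ≠ "" ∧ PySem.Set.contains winning p.1 then acc + p.2 else acc) 0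
  -- count is a nonnegative Python int, so 2 ** count = 2 ^ count.toNat exactly
  PySem.Int.floordiv (2 ^ count.toNat) 2

-- ===== PRECONDITION & SPEC =====
def Spec_numWinningCards (cardNums : List String) (winningCardNums : List String) (out : Int) : Prop := out = numWinningCards_alt cardNums winningCardNums
instance (cardNums : List String) (winningCardNums : List String) (out : Int) : Decidable (Spec_numWinningCards cardNums winningCardNums out) := by unfold Spec_numWinningCards; infer_instance

-- ===== CLAIM =====
def Claim_equal_numWinningCards : Prop := ∀ (cardNums : List String) (winningCardNums : List String), Dom_numWinningCards cardNums winningCardNums → Spec_numWinningCards cardNums winningCardNums (numWinningCards cardNums winningCardNums)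

-- ===== LEMMAS AND PROOFS =====

def pvClosed (k : Nat) : Int := if k = 0 then 0 else 2 ^ (k - 1)

theorem pvClosed_step (k : Nat) :
    (if pvClosed k = 0 then 1 else pvClosed k * 2) = pvClosed (k + 1) := by
  unfold pvClosed
  rcases Nat.eq_zero_or_pos k with h | h
  · subst h; simp
  · have hk : k ≠ 0 := Nat.pos_iff_ne_zero.mp h
    have hk1 : k + 1 ≠ 0 := by omega
    have hne : (2 : Int) ^ (k - 1) ≠ 0 := pow_ne_zero _ (by norm_num)
    rw [if_neg hk, if_neg hk1, if_neg hne,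
      show k + 1 - 1 = (k - 1) + 1 from by omega, pow_succ]

-- A's loop computes the closed form of the number of matches.
theorem pvFold_invariant (w : List String) (l : List String) (k : Nat) :
    l.foldl
      (fun final num =>
        if num ≠ "" ∧ w.contains num then
          if final = 0 then 1 else final * 2
        else final)
      (pvClosed k)
    = pvClosed (k + l.countP (fun num => num ≠ "" && w.contains num)) := by
  induction l generalizing k with
  | nil => simp
  | cons x xs ih =>
    rw [List.foldl_cons, List.countP_cons]
    by_cases hx : x ≠ "" ∧ w.contains x
    · have hb : (decide (x ≠ "") && w.contains x) = true := by
        rw [Bool.and_eq_true]; exact ⟨by simp [hx.1], hx.2⟩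
      rw [if_pos hx, pvClosed_step, ih, hb]
      congr 1
      simp only [reduceIte]
      omega
    · have hb : (decide (x ≠ "") && w.contains x) = false := by
        rcases not_and_or.mp hx with h | h
        · simp only [ne_eq, not_not] at h; simp [h]
        · rw [Bool.and_eq_false_iff]; right; exact eq_false_of_ne_true h
      rw [if_neg hx, ih, hb]
      simp

-- fold with a conditional add is the sum of a conditional map
theorem pvFoldAdd {α : Type} (P : α → Prop) [DecidablePred P] (g : α → Int)
    (l : List α) (a : Int) :
    l.foldl (fun acc x => if P x then acc + g x else acc) a
      = a + (l.map (fun x => if P x then g x else 0)).sum := by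
  induction l generalizing a with
  | nil => simp
  | cons x xs ih =>
    rw [List.foldl_cons, ih, List.map_cons, List.sum_cons]
    by_cases hx : P x
    · rw [if_pos hx, if_pos hx]; ring
    · rw [if_neg hx, if_neg hx]; ring

-- sum over a Nodup list of an indicator at x
theorem pvSumIndicator {α : Type} [DecidableEq α] (P : α → Prop) [DecidablePred P]
    (x : α) (c : Int) (K : List α) (hnd : K.Nodup) :
    (K.map (fun k => if P k ∧ k = x then c else 0)).sum
      = if P x ∧ x ∈ K then c else 0 := by
  induction K with
  | nil => simp
  | cons y ys ih =>
    obtain ⟨hy, hnd'⟩ := List.nodup_cons.mp hnd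
    rw [List.map_cons, List.sum_cons, ih hnd']
    by_cases hyx : y = x
    · subst hyx
      by_cases hP : P y
      · simp [hP, hy]
      · simp [hP]
    · have hxy : ¬x = y := fun h => hyx h.symm
      by_cases hPx : P x <;> by_cases hm : x ∈ ys <;> simp [hPx, hm, hyx, hxy]

-- pointwise sum splits
theorem pvSumMapAdd {α : Type} (f g : α → Int) (K : List α) :
    (K.map (fun k => f k + g k)).sum = (K.map f).sum + (K.map g).sum := by
  induction K with
  | nil => simp
  | cons y ys ih =>
    simp only [List.map_cons, List.sum_cons, ih]
    ring

-- summing counts over any Nodup superset of the elements is countP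
theorem pvSumCounts (P : String → Prop) [DecidablePred P]
    (xs : List String) (K : List String) (hnd : K.Nodup)
    (hcov : ∀ y ∈ xs, y ∈ K) :
    (K.map (fun k => if P k then (xs.count k : Int) else 0)).sum
      = (xs.countP (fun s => decide (P s)) : Int) := by
  induction xs with
  | nil => simp
  | cons x xs ih =>
    have hxK : x ∈ K := hcov x List.mem_cons_self
    have hmap : (K.map (fun k => if P k then ((x :: xs).count k : Int) else 0))
        = K.map (fun k => (if P k then (xs.count k : Int) else 0)
            + (if P k ∧ k = x then 1 else 0)) := by
      apply List.map_congr_left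
      intro k _
      by_cases hP : P k
      · by_cases hkx : k = x
        · subst hkx
          simp [hP]
        · have hxk : ¬x = k := fun h => hkx h.symm
          simp [hP, hkx, hxk]
      · simp [hP]
    rw [hmap, pvSumMapAdd, ih (fun y hy => hcov y (List.mem_cons_of_mem _ hy)),
      pvSumIndicator P x 1 K hnd, List.countP_cons]
    by_cases hPx : P x
    · rw [if_pos ⟨hPx, hxK⟩]
      simp [hPx]
    · rw [if_neg (fun h => hPx h.1)]
      simp [hPx]

theorem pvClosed_eq_floordiv (k : Nat) :
    pvClosed k = PySem.Int.floordiv (2 ^ k) 2 := by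
  rw [PySem.Int.floordiv_eq_ediv_of_pos (by norm_num)]
  unfold pvClosed
  rcases Nat.eq_zero_or_pos k with h | h
  · subst h; decide
  · rw [if_neg (Nat.pos_iff_ne_zero.mp h),
      show k = (k - 1) + 1 from by omega, pow_succ,
      Int.mul_ediv_cancel _ (by norm_num)]
    simp

-- ===== VERDICT =====
theorem numWinningCards_spec : Claim_equal_numWinningCards := by
  intro cardNums winningCardNums _
  unfold Spec_numWinningCards numWinningCards
  show _ = PySem.Int.floordiv
    (2 ^ (((PySem.Dict.counter cardNums).items.foldl
      (fun (acc : Int) (p : String × Int) =>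
        if p.1 ≠ "" ∧ PySem.Set.contains (PySem.Set.ofList winningCardNums) p.1
        then acc + p.2 else acc) 0).toNat)) 2
  rw [PySem.Dict.items_counter]
  have hA := pvFold_invariant winningCardNums cardNums 0
  simp only [show pvClosed 0 = 0 from rfl, Nat.zero_add] at hA
  rw [hA,
    pvFoldAdd (fun p : String × Int => p.1 ≠ "" ∧ PySem.Set.contains (PySem.Set.ofList winningCardNums) p.1)
      (fun p => p.2) ((PySem.Set.ofList cardNums).map (fun k => (k, (cardNums.count k : Int)))) 0,
    List.map_map]
  have hmap2 : ((PySem.Set.ofList cardNums).map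
        ((fun p : String × Int => if p.1 ≠ "" ∧ PySem.Set.contains (PySem.Set.ofList winningCardNums) p.1 then p.2 else 0)
          ∘ (fun k => (k, (cardNums.count k : Int)))))
      = (PySem.Set.ofList cardNums).map
          (fun k => if (fun s => s ≠ "" ∧ winningCardNums.contains s = true) k then (cardNums.count k : Int) else 0) := by
    apply List.map_congr_left
    intro k _
    simp [Function.comp]
  rw [hmap2, zero_add, pvSumCounts (fun s => s ≠ "" ∧ winningCardNums.contains s = true) cardNums
        (PySem.Set.ofList cardNums) (PySem.Set.nodup_ofList cardNums)
        (fun y hy => (PySem.Set.mem_ofList cardNums y).mpr hy)]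
  have hcP : cardNums.countP (fun s => decide (s ≠ "" ∧ winningCardNums.contains s = true))
      = cardNums.countP (fun num => num ≠ "" && winningCardNums.contains num) := by
    apply List.countP_congr
    intro s _
    by_cases h1 : s = ""
    · simp [h1]
    · by_cases h2 : winningCardNums.contains s
      · simp [h1]
      · simp [h1, h2]
  rw [hcP, pvClosed_eq_floordiv, Int.toNat_natCast]
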